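-- pv_equiv track=rewrite | github.com/Frosmin/Numerical-Analysis | condicion.py | norma_unitaria
-- ===== SOURCE A (Python) =====
-- def norma_unitaria(matriz):
--     tam_columnas = len(matriz[0])
--     tam_filas = len(matriz)
--     mayor = 0
--     for i in range(tam_columnas):
--         suma =0
--         for j in range (tam_filas):
--             suma += abs(matriz[j][i])
--         if suma > mayor:
--             mayor = suma
--     return mayor
-- ===== SOURCE B (Python) =====
-- def norma_unitaria(matriz):
--     sums = [0] * len(matriz[0])
--     for fila in matriz:
--         sums = [s + abs(x) for s, x in zip(sums, fila)]
--     return max(sums, default=0)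
-- ===== Notes on version B (the rewrite author's own statement) =====
-- stated objective: alternative
-- what changed: B replaces A's column-by-column nested index loops with a row-major single pass that maintains a table of all column sums (updated per row via zip) and reduces it with max(..., default=0) at the end.
import Mathlib
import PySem

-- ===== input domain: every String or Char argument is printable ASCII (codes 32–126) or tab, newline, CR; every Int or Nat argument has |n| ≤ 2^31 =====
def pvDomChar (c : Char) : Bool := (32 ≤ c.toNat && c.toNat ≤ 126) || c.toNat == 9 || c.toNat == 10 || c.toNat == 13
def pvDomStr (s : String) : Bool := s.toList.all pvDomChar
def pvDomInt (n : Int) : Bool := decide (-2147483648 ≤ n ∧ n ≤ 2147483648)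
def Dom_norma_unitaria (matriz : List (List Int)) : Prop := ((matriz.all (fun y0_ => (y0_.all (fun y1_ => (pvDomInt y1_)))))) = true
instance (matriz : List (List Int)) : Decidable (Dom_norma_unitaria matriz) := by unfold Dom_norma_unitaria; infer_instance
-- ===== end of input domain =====

-- B keeps a full table of running column sums updated row-major and reduces with max at the end,
-- instead of A's column-by-column running-max scan; same cost, different decomposition.

-- ===== PORT A =====
def norma_unitaria (matriz : List (List Int)) : Int :=
  let tam_columnas : Int := (PySem.List.pyGetD matriz 0 []).length
  let tam_filas : Int := matriz.length
  (PySem.List.pyRange 0 tam_columnas 1).foldl (fun mayor i =>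
    let suma := (PySem.List.pyRange 0 tam_filas 1).foldl
      (fun suma j => suma + |PySem.List.pyGetD (PySem.List.pyGetD matriz j []) i 0|) 0
    if suma > mayor then suma else mayor) 0

-- ===== PORT B =====
def norma_unitaria_alt (matriz : List (List Int)) : Int :=
  let sums0 : List Int := List.replicate (PySem.List.pyGetD matriz 0 []).length 0
  let sums := matriz.foldl (fun sums fila => (sums.zip fila).map (fun p => p.1 + |p.2|)) sums0
  (PySem.List.max? sums (fun y => y)).getD 0

-- ===== PRECONDITION & SPEC =====
-- A raises IndexError on the empty matrix (matriz[0]) and on any row shorter than the first row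
-- (matriz[j][i]); exactly those inputs are excluded.
def Pre_norma_unitaria (matriz : List (List Int)) : Prop :=
  matriz ≠ [] ∧ ∀ fila ∈ matriz, (matriz.headD []).length ≤ fila.length
instance (matriz : List (List Int)) : Decidable (Pre_norma_unitaria matriz) := by
  unfold Pre_norma_unitaria; infer_instance
def pvWitness_norma_unitaria : List (List Int) := [[1, -2], [3, 4]]
def Spec_norma_unitaria (matriz : List (List Int)) (out : Int) : Prop := out = norma_unitaria_alt matriz
instance (matriz : List (List Int)) (out : Int) : Decidable (Spec_norma_unitaria matriz out) := by unfold Spec_norma_unitaria; infer_instance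

-- ===== CLAIM (what is proved, stated in full; the proofs are below) =====
def Claim_equal_norma_unitaria : Prop := ∀ (matriz : List (List Int)), Dom_norma_unitaria matriz → Pre_norma_unitaria matriz → Spec_norma_unitaria matriz (norma_unitaria matriz)

-- ===== LEMMAS AND PROOFS =====

-- sum of |fila[k]| over the rows
def pvColSum (m : List (List Int)) (k : Nat) : Int :=
  (m.map (fun fila => |fila.getD k 0|)).sum

lemma pv_range_map_getD (xs : List Int) :
    (List.range xs.length).map (fun k => xs.getD k 0) = xs := by
  apply List.ext_getElem
  · simp
  · intro i h1 h2
    simp [List.getD_eq_getElem?_getD, List.getElem?_eq_getElem h2]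

-- B's fold characterised: a table of column sums
lemma pv_foldB (m : List (List Int)) (sums : List Int)
    (h : ∀ fila ∈ m, sums.length ≤ fila.length) :
    m.foldl (fun s fila => (s.zip fila).map (fun p => p.1 + |p.2|)) sums
      = (List.range sums.length).map (fun k => sums.getD k 0 + pvColSum m k) := by
  induction m generalizing sums with
  | nil =>
      simp only [List.foldl_nil, pvColSum, List.map_nil, List.sum_nil, add_zero]
      exact (pv_range_map_getD sums).symm
  | cons fila m ih =>
      have hfl : sums.length ≤ fila.length := h fila (List.mem_cons_self ..)
      have hlen : ((sums.zip fila).map (fun p => p.1 + |p.2|)).length = sums.length := by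
        simp [Nat.min_eq_left hfl]
      simp only [List.foldl_cons]
      rw [ih _ (by intro f hf; rw [hlen]; exact h f (List.mem_cons_of_mem _ hf)), hlen]
      apply List.map_congr_left
      intro k hk
      have hk' : k < sums.length := List.mem_range.mp hk
      have hk'' : k < fila.length := lt_of_lt_of_le hk' hfl
      have : ((sums.zip fila).map (fun p => p.1 + |p.2|)).getD k 0
          = sums.getD k 0 + |fila.getD k 0| := by
        rw [List.getD_eq_getElem?_getD, List.getElem?_eq_getElem (by omega),
          List.getD_eq_getElem?_getD, List.getElem?_eq_getElem hk',
          List.getD_eq_getElem?_getD, List.getElem?_eq_getElem hk'']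
        simp
      rw [this]
      simp only [pvColSum, List.map_cons, List.sum_cons]
      ring

-- A's inner loop is the column sum
lemma pv_inner (matriz : List (List Int)) (i : Int) (hi0 : 0 ≤ i) :
    (PySem.List.pyRange 0 (matriz.length : Int) 1).foldl
        (fun suma j => suma + |PySem.List.pyGetD (PySem.List.pyGetD matriz j []) i 0|) 0
      = pvColSum matriz i.toNat := by
  rw [PySem.List.foldl_pyRange_zero_pyGetD' matriz []
      (fun suma fila => suma + |PySem.List.pyGetD fila i 0|) 0]
  rw [PySem.List.foldl_add]
  simp only [zero_add, pvColSum]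
  congr 1
  apply List.map_congr_left
  intro fila _
  rw [show i = ((i.toNat : Nat) : Int) by omega, PySem.List.pyGetD_natCast,
    Int.toNat_natCast]

lemma pv_colSum_nonneg (m : List (List Int)) (k : Nat) : 0 ≤ pvColSum m k := by
  unfold pvColSum
  apply List.sum_nonneg
  intro x hx
  obtain ⟨fila, _, rfl⟩ := List.mem_map.mp hx
  exact abs_nonneg _

lemma pv_foldl_max_map (l : List Nat) (f : Nat → Int) (a : Int) :
    (l.map f).foldl max a = l.foldl (fun acc x => max acc (f x)) a := by
  induction l generalizing a with
  | nil => rfl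
  | cons x t ih => simp [List.foldl_cons, ih]

-- running max with strict '>' is 'max'
lemma pv_if_gt_max (a b : Int) : (if b > a then b else a) = max a b := by
  rcases Int.lt_or_le a b with h | h
  · simp [h, max_eq_right (le_of_lt h)]
  · simp [Int.not_lt.mpr h, max_eq_left h]

-- ===== VERDICT (by name: the statement is the Claim_ definition above) =====
theorem norma_unitaria_spec : Claim_equal_norma_unitaria := by
  intro matriz _ hpre
  obtain ⟨hne, hrows⟩ := hpre
  unfold Spec_norma_unitaria norma_unitaria norma_unitaria_alt
  obtain ⟨r0, rest, rfl⟩ : ∃ r0 rest, matriz = r0 :: rest :=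
    ⟨matriz.headD [], matriz.tail, by cases matriz with | nil => exact absurd rfl hne | cons a t => rfl⟩
  set matriz := r0 :: rest with hm
  set nc := r0.length with hnc
  have hget0 : PySem.List.pyGetD matriz 0 [] = r0 := by
    simp [hm, PySem.List.pyGetD]
  simp only [hget0]
  have hrows' : ∀ fila ∈ matriz, nc ≤ fila.length := by
    intro f hf; exact hrows f hf
  -- B side: the accumulated table is the list of column sums
  have hB : matriz.foldl (fun s fila => (s.zip fila).map (fun p => p.1 + |p.2|))
        (List.replicate nc 0)
      = (List.range nc).map (fun k => pvColSum matriz k) := by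
    rw [pv_foldB matriz (List.replicate nc 0) (by simpa using hrows')]
    simp only [List.length_replicate]
    apply List.map_congr_left
    intro k _
    have : (List.replicate nc (0 : Int)).getD k 0 = 0 := by
      simp [List.getD_eq_getElem?_getD, List.getElem?_replicate]
      split <;> rfl
    rw [this, zero_add]
  rw [hB]
  -- A side: running max of the column sums
  have hA :
      (PySem.List.pyRange 0 (nc : Int) 1).foldl (fun mayor i =>
        let suma := (PySem.List.pyRange 0 (matriz.length : Int) 1).foldl
          (fun suma j => suma + |PySem.List.pyGetD (PySem.List.pyGetD matriz j []) i 0|) 0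
        if suma > mayor then suma else mayor) 0
      = (List.range nc).foldl (fun acc k => max acc (pvColSum matriz k)) 0 := by
    have h1 : (PySem.List.pyRange 0 (nc : Int) 1).foldl (fun mayor i =>
        let suma := (PySem.List.pyRange 0 (matriz.length : Int) 1).foldl
          (fun suma j => suma + |PySem.List.pyGetD (PySem.List.pyGetD matriz j []) i 0|) 0
        if suma > mayor then suma else mayor) 0
        = (PySem.List.pyRange 0 (nc : Int) 1).foldl
            (fun mayor i => max mayor (pvColSum matriz i.toNat)) 0 := by
      apply PySem.List.foldl_congr_mem
      intro acc i hi
      have hi0 : 0 ≤ i := (PySem.List.mem_pyRange_one.mp hi).1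
      simp only
      rw [pv_inner matriz i hi0, pv_if_gt_max]
    rw [h1, PySem.List.pyRange_zero_nat, List.foldl_map]
    apply PySem.List.foldl_congr_mem
    intro acc k _
    simp
  rw [hA, ← pv_foldl_max_map (List.range nc) (fun k => pvColSum matriz k) 0]
  -- both sides are the max of the same list L
  cases hL : (List.range nc).map (fun k => pvColSum matriz k) with
  | nil => simp [PySem.List.max?]
  | cons x t =>
      rw [PySem.List.max?_id_cons]
      simp only [Option.getD_some, List.foldl_cons]
      have hx : 0 ≤ x := by
        have : x ∈ (List.range nc).map (fun k => pvColSum matriz k) := by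
          rw [hL]; exact List.mem_cons_self ..
        obtain ⟨k, _, rfl⟩ := List.mem_map.mp this
        exact pv_colSum_nonneg matriz k
      rw [max_eq_right hx]
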